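-- pv_equiv track=rewrite | github.com/malcolmsailor/voice_leader | voice_leader.py | _remap_from_omitted_indices
-- ===== SOURCE A (Python) =====
-- import typing as t
--
-- def _remap_from_omitted_indices(
--     mapping: t.Dict[int, t.Any], omitted_indices: t.Sequence[int]
-- ):
--     """Used by shrinking_cardinality_handler()
--
--     >>> _remap_from_omitted_indices({0:"a", 1:"b", 2:"c"}, [1,])
--     {0: 'a', 1: 'c'}
--
--     >>> _remap_from_omitted_indices({0:"a", 2:"c"}, [1,])
--     {0: 'a', 1: 'c'}
--
--     >>> _remap_from_omitted_indices({0:"a", 1:"b", 2:"c"}, [3,])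
--     {0: 'a', 1: 'b', 2: 'c'}
--
--     >>> _remap_from_omitted_indices({}, [1, 2])
--     {}
--     """
--     # This function feels inelegant...
--     if not mapping:
--         return {}
--     out = {}
--     j = 0
--     for i in range(max(mapping) + 1):
--         if i in mapping:
--             out[j] = mapping[i]
--         if i in omitted_indices:
--             j -= 1
--         j += 1
--     return out
-- ===== SOURCE B (Python) =====
-- def _remap_from_omitted_indices(mapping, omitted_indices):
--     # Iterate only over the keys actually present (ascending), computing each
--     # key's shift directly, instead of sweeping the dense range 0..max with a
--     # running counter.  Negative keys are not voice indices and are ignored,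
--     # exactly as the 0-based range sweep ignores them.
--     omitted = set(omitted_indices)
--     out = {}
--     for i in sorted(k for k in mapping if k >= 0):
--         offset = len([o for o in omitted if 0 <= o < i])
--         out[i - offset] = mapping[i]
--     return out
-- ===== Notes on version B (the rewrite author's own statement) =====
-- stated objective: simpler
-- what changed: B iterates only the present keys in sorted order and computes each key's shift as a direct count of distinct omitted indices below it, instead of A's dense sweep over range(0, max(mapping)+1) with a running counter.
import Mathlib
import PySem

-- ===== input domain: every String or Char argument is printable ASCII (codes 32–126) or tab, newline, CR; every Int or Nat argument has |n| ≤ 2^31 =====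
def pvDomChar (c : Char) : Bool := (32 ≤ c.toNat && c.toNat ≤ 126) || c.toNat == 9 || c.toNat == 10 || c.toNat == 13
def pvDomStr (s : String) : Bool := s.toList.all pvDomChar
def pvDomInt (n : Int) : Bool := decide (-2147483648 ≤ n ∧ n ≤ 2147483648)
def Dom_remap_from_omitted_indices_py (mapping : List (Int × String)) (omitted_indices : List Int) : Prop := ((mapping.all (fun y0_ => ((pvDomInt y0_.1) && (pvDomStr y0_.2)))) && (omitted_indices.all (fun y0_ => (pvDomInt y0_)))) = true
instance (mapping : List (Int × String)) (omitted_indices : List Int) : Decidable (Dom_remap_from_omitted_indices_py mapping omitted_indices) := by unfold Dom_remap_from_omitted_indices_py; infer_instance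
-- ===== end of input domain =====

-- B replaces A's dense sweep over range(0, max+1) with a fold over the sorted present keys,
-- computing each key's shift directly; objective: simpler.

-- ===== PORT A =====
-- Literal transliteration of A: dict built from the pairs, guard on emptiness, then a
-- fold over range(0, max(mapping)+1) with state (out, j).  `mapping[i]` is ported as
-- getD with default "" — exact because it is guarded by `i in mapping`.
def remap_from_omitted_indices_py (mapping : List (Int × String)) (omitted_indices : List Int) : List (Int × String) :=
  let d := PySem.Dict.ofList mapping
  if mapping.isEmpty then [] else
  match PySem.List.max? d.keys (fun x => x) with
  | none => []   -- unreachable: mapping nonempty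
  | some m =>
    ((PySem.List.pyRange 0 (m + 1) 1).foldl
      (fun (st : PySem.Dict Int String × Int) i =>
        let out := if d.contains i then st.1.insert st.2 (d.getD i "") else st.1
        let j := if omitted_indices.contains i then st.2 - 1 else st.2
        (out, j + 1))
      (PySem.Dict.empty, 0)).1.items

-- ===== PORT B =====
-- Literal transliteration of B: set of omitted indices, fold over the sorted nonnegative
-- present keys, inserting at i - |{o in omitted : 0 <= o < i}|.
def remap_from_omitted_indices_py_alt (mapping : List (Int × String)) (omitted_indices : List Int) : List (Int × String) :=
  let d := PySem.Dict.ofList mapping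
  let om : PySem.Set Int := PySem.Set.ofList omitted_indices
  ((PySem.List.sorted (d.keys.filter (fun k => decide (0 ≤ k))) (fun x => x) false).foldl
    (fun (out : PySem.Dict Int String) i =>
      out.insert (i - (om.countP (fun o => decide (0 ≤ o ∧ o < i)) : Int)) (d.getD i ""))
    PySem.Dict.empty).items

-- ===== PRECONDITION & SPEC =====
def Spec_remap_from_omitted_indices_py (mapping : List (Int × String)) (omitted_indices : List Int) (out : List (Int × String)) : Prop := out = remap_from_omitted_indices_py_alt mapping omitted_indices
instance (mapping : List (Int × String)) (omitted_indices : List Int) (out : List (Int × String)) : Decidable (Spec_remap_from_omitted_indices_py mapping omitted_indices out) := by unfold Spec_remap_from_omitted_indices_py; infer_instance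

-- ===== CLAIM (what is proved, stated in full; the proofs are below) =====
def Claim_equal_remap_from_omitted_indices_py : Prop := ∀ (mapping : List (Int × String)) (omitted_indices : List Int), Dom_remap_from_omitted_indices_py mapping omitted_indices → Spec_remap_from_omitted_indices_py mapping omitted_indices (remap_from_omitted_indices_py mapping omitted_indices)

-- ===== LEMMAS AND PROOFS =====

-- Named copies of the two loop bodies (definitionally equal to the lambdas in the ports).
def pvAstep (d : PySem.Dict Int String) (omitted_indices : List Int)
    (st : PySem.Dict Int String × Int) (i : Int) : PySem.Dict Int String × Int :=
  let out := if d.contains i then st.1.insert st.2 (d.getD i "") else st.1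
  let j := if omitted_indices.contains i then st.2 - 1 else st.2
  (out, j + 1)

def pvBstep (d : PySem.Dict Int String) (om : List Int)
    (out : PySem.Dict Int String) (i : Int) : PySem.Dict Int String :=
  out.insert (i - (om.countP (fun o => decide (0 ≤ o ∧ o < i)) : Int)) (d.getD i "")

-- the shift B computes for key i
def pvC (om : List Int) (i : Int) : Int := (om.countP (fun o => decide (0 ≤ o ∧ o < i)) : Int)

-- counting distinct omitted indices below i+1 vs below i
theorem pv_countP_step (i : Int) (h0 : 0 ≤ i) : ∀ om : List Int, om.Nodup →
    om.countP (fun o => decide (0 ≤ o ∧ o < i + 1))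
      = om.countP (fun o => decide (0 ≤ o ∧ o < i)) + (if i ∈ om then 1 else 0) := by
  intro om
  induction om with
  | nil => simp
  | cons a t ih =>
    intro hnd
    rw [List.nodup_cons] at hnd
    rw [List.countP_cons, List.countP_cons, ih hnd.2]
    by_cases ha : a = i
    · subst ha
      have h1 : decide (0 ≤ a ∧ a < a + 1) = true := by simp; omega
      have h2 : decide (0 ≤ a ∧ a < a) = false := by simp
      simp [h1, h2, hnd.1]
      omega
    · have h1 : decide (0 ≤ a ∧ a < i + 1) = decide (0 ≤ a ∧ a < i) := by
        rw [decide_eq_decide]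
        constructor
        · rintro ⟨hc1, hc2⟩
          exact ⟨hc1, lt_of_le_of_ne (by omega) ha⟩
        · rintro ⟨hc1, hc2⟩
          exact ⟨hc1, by omega⟩
      have h2 : (i ∈ a :: t) = (i ∈ t) := by
        simp only [List.mem_cons, eq_iff_iff]
        constructor
        · rintro (h | h)
          · exact absurd h.symm ha
          · exact h
        · exact Or.inr
      simp only [h1, h2]
      by_cases hit : i ∈ t <;> simp [hit] <;> omega

theorem pvC_step (om : List Int) (hnd : om.Nodup) (i : Int) (h0 : 0 ≤ i) :
    pvC om (i + 1) = pvC om i + (if i ∈ om then 1 else 0) := by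
  unfold pvC
  rw [pv_countP_step i h0 om hnd]
  by_cases h : i ∈ om <;> simp [h]

-- peeling the least candidate off a strictly sorted filter
theorem pvFilter_split (a b : Int) (hab : a < b) :
    ∀ ks : List Int, ks.Pairwise (· < ·) →
      ks.filter (fun k => decide (a ≤ k ∧ k < b)) =
        (if a ∈ ks then [a] else []) ++ ks.filter (fun k => decide (a + 1 ≤ k ∧ k < b)) := by
  intro ks
  induction ks with
  | nil => simp
  | cons k t ih =>
    intro hp
    have hkt : ∀ x ∈ t, k < x := (List.pairwise_cons.mp hp).1
    have ih' := ih (List.pairwise_cons.mp hp).2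
    by_cases hk : k = a
    · subst hk
      have hknt : k ∉ t := fun h => lt_irrefl k (hkt k h)
      have h1 : decide (k ≤ k ∧ k < b) = true := by simp [hab]
      have h2 : decide (k + 1 ≤ k ∧ k < b) = false := by simp
      have h3 : t.filter (fun x => decide (k ≤ x ∧ x < b))
          = t.filter (fun x => decide (k + 1 ≤ x ∧ x < b)) := by
        apply List.filter_congr
        intro x hx
        have := hkt x hx
        rcases Decidable.em (x < b) with h | h <;> simp [h] <;> omega
      rw [if_pos (List.mem_cons_self), List.filter_cons, List.filter_cons, h1, h2, h3]
      simp
    · by_cases hka : k < a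
      · have hna : a ∈ k :: t ↔ a ∈ t := by
          simp only [List.mem_cons]
          constructor
          · rintro (h | h)
            · exact absurd h.symm hk
            · exact h
          · exact Or.inr
        have h1 : decide (a ≤ k ∧ k < b) = false := by simp; omega
        have h2 : decide (a + 1 ≤ k ∧ k < b) = false := by simp; omega
        simp only [List.filter_cons, h1, h2, if_neg Bool.false_ne_true]
        rw [ih']
        by_cases ha : a ∈ t <;> simp [ha, hna]
      · have hak : a < k := lt_of_le_of_ne (not_lt.mp hka) (fun h => hk h.symm)
        have hant : a ∉ t := fun h => absurd (hkt a h) (by omega)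
        have hna : a ∉ k :: t := by
          intro h
          rcases List.mem_cons.mp h with h | h
          · exact hk h.symm
          · exact hant h
        have h1 : decide (a ≤ k ∧ k < b) = decide (a + 1 ≤ k ∧ k < b) := by
          rcases Decidable.em (k < b) with h | h <;> simp [h] <;> omega
        have h3 : t.filter (fun x => decide (a ≤ x ∧ x < b))
            = t.filter (fun x => decide (a + 1 ≤ x ∧ x < b)) := by
          apply List.filter_congr
          intro x hx
          have := hkt x hx
          rcases Decidable.em (x < b) with h | h <;> simp [h] <;> omega
        rw [if_neg hna, List.nil_append, List.filter_cons, List.filter_cons, h1, h3]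

-- the core invariant: A's range sweep from a equals B's fold over the present keys in [a, a+n)
theorem pvLoop_eq (d : PySem.Dict Int String) (omitted_indices om ks : List Int)
    (hnd : om.Nodup) (hmem : ∀ x : Int, x ∈ om ↔ x ∈ omitted_indices)
    (hks : ks = PySem.List.sorted (d.keys.filter (fun k => decide (0 ≤ k))) (fun x => x) false)
    (hkeys : d.keys.Nodup) :
    ∀ (n : Nat) (a : Int) (out : PySem.Dict Int String), 0 ≤ a →
      (PySem.List.pyRange a (a + (n : Int)) 1).foldl (pvAstep d omitted_indices) (out, a - pvC om a)
        = ((ks.filter (fun k => decide (a ≤ k ∧ k < a + (n : Int)))).foldl (pvBstep d om) out,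
           a + (n : Int) - pvC om (a + (n : Int))) := by
  have hpair : ks.Pairwise (· < ·) := by
    have hndf : (d.keys.filter (fun k => decide (0 ≤ k))).Nodup := hkeys.filter _
    have hper : ks.Perm (d.keys.filter (fun k => decide (0 ≤ k))) := by
      rw [hks]; exact PySem.List.sorted_perm _ _ _
    have hndks : ks.Nodup := (List.Perm.nodup_iff hper).mpr hndf
    have hle : ks.Pairwise (fun x y : Int => x ≤ y) := by
      rw [hks]; exact PySem.List.sorted_pairwise _ _
    exact (hle.and hndks).imp (fun h => lt_of_le_of_ne h.1 h.2)
  have hmemks : ∀ x : Int, 0 ≤ x → (x ∈ ks ↔ d.contains x = true) := by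
    intro x hx
    rw [hks, PySem.List.mem_sorted, List.mem_filter]
    constructor
    · intro h
      exact (PySem.Dict.contains_iff_mem_keys _ _).mpr h.1
    · intro h
      exact ⟨(PySem.Dict.contains_iff_mem_keys _ _).mp h, by simpa using hx⟩
  intro n
  induction n with
  | zero =>
    intro a out h0
    have hr : PySem.List.pyRange a (a + ((0 : Nat) : Int)) 1 = [] :=
      PySem.List.pyRange_one_eq_nil (by simp)
    have hf : ks.filter (fun k => decide (a ≤ k ∧ k < a + ((0 : Nat) : Int))) = [] := by
      rw [List.filter_eq_nil_iff]
      intro k _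
      simp
    rw [hr, hf]
    simp
  | succ n ih =>
    intro a out h0
    have hlt : a < a + (((n : Nat) + 1 : Nat) : Int) := by push_cast; omega
    rw [PySem.List.pyRange_one_cons hlt, List.foldl_cons]
    have hcont : omitted_indices.contains a = decide (a ∈ om) := by
      by_cases hmo : a ∈ om
      · simp [hmo, (hmem a).mp hmo]
      · have : a ∉ omitted_indices := fun h => hmo ((hmem a).mpr h)
        simp [hmo, this]
    have hstep : pvAstep d omitted_indices (out, a - pvC om a) a
        = (if d.contains a then out.insert (a - pvC om a) (d.getD a "") else out,
           (a + 1) - pvC om (a + 1)) := by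
      unfold pvAstep
      rw [pvC_step om hnd a h0, hcont]
      by_cases hmo : a ∈ om <;> simp [hmo] <;> omega
    rw [hstep]
    have hstep2 : ∀ out', (PySem.List.pyRange (a + 1) (a + (((n : Nat) + 1 : Nat) : Int)) 1).foldl
        (pvAstep d omitted_indices) (out', (a + 1) - pvC om (a + 1))
        = ((ks.filter (fun k => decide (a + 1 ≤ k ∧ k < a + (((n : Nat) + 1 : Nat) : Int)))).foldl (pvBstep d om) out',
           a + (((n : Nat) + 1 : Nat) : Int) - pvC om (a + (((n : Nat) + 1 : Nat) : Int))) := by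
      intro out'
      have he : a + (((n : Nat) + 1 : Nat) : Int) = (a + 1) + ((n : Nat) : Int) := by push_cast; ring
      rw [he]
      exact ih (a + 1) out' (by omega)
    rw [hstep2]
    rw [pvFilter_split a (a + (((n : Nat) + 1 : Nat) : Int)) hlt ks hpair]
    rw [List.foldl_append]
    by_cases hc : d.contains a = true
    · rw [if_pos hc, if_pos ((hmemks a h0).mpr hc)]
      simp only [List.foldl_cons, List.foldl_nil]
      unfold pvBstep pvC
      rfl
    · rw [if_neg hc]
      have : a ∉ ks := fun h => hc ((hmemks a h0).mp h)
      rw [if_neg this]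
      simp only [List.foldl_nil]

-- ===== VERDICT (by name: the statement is the Claim_ definition above) =====
theorem pv_keys_ofList (mapping : List (Int × String)) :
    (PySem.Dict.ofList mapping).keys = PySem.Set.ofList (mapping.map Prod.fst) := by
  show (mapping.foldl (fun d p => d.insert p.1 p.2) PySem.Dict.empty).keys = _
  rw [PySem.Dict.keys_foldl_insert_key]
  rfl

theorem remap_from_omitted_indices_py_spec : Claim_equal_remap_from_omitted_indices_py := by
  unfold Claim_equal_remap_from_omitted_indices_py Spec_remap_from_omitted_indices_py
  intro mapping omitted_indices _
  by_cases hemp : mapping.isEmpty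
  · have h0 : mapping = [] := by
      cases mapping with
      | nil => rfl
      | cons p t => simp [List.isEmpty] at hemp
    subst h0
    rfl
  · simp only [remap_from_omitted_indices_py, remap_from_omitted_indices_py_alt]
    rw [if_neg hemp]
    have hkeysnd : (PySem.Dict.ofList mapping).keys.Nodup := PySem.Dict.nodup_keys_ofList mapping
    have hkne : (PySem.Dict.ofList mapping).keys ≠ [] := by
      have hm : mapping ≠ [] := by
        cases mapping with
        | nil => simp at hemp
        | cons p t => simp
      obtain ⟨p, hp⟩ := List.exists_mem_of_ne_nil mapping hm
      have hmem1 : p.1 ∈ PySem.Set.ofList (mapping.map Prod.fst) :=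
        (PySem.Set.mem_ofList _ _).mpr (List.mem_map_of_mem hp)
      rw [pv_keys_ofList]
      intro h
      rw [h] at hmem1
      exact List.not_mem_nil hmem1
    obtain ⟨m, hm⟩ : ∃ m, PySem.List.max? (PySem.Dict.ofList mapping).keys (fun x => x) = some m := by
      cases h : PySem.List.max? (PySem.Dict.ofList mapping).keys (fun x => x) with
      | none => exact absurd ((PySem.List.max?_eq_none_iff _ _).mp h) hkne
      | some m => exact ⟨m, rfl⟩
    rw [hm]
    have hmax : ∀ y ∈ (PySem.Dict.ofList mapping).keys, y ≤ m := by
      intro y hy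
      exact PySem.List.max?_isMax hm y hy
    have hA : (fun (st : PySem.Dict Int String × Int) i =>
        let out := if (PySem.Dict.ofList mapping).contains i then st.1.insert st.2 ((PySem.Dict.ofList mapping).getD i "") else st.1
        let j := if omitted_indices.contains i then st.2 - 1 else st.2
        (out, j + 1)) = pvAstep (PySem.Dict.ofList mapping) omitted_indices := rfl
    have hB : (fun (out : PySem.Dict Int String) i =>
        out.insert (i - ((PySem.Set.ofList omitted_indices : List Int).countP (fun o => decide (0 ≤ o ∧ o < i)) : Int)) ((PySem.Dict.ofList mapping).getD i "")) = pvBstep (PySem.Dict.ofList mapping) (PySem.Set.ofList omitted_indices) := rfl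
    rw [hA, hB]
    show (List.foldl (pvAstep (PySem.Dict.ofList mapping) omitted_indices) (PySem.Dict.empty, 0)
            (PySem.List.pyRange 0 (m + 1))).1.items
        = (List.foldl (pvBstep (PySem.Dict.ofList mapping) (PySem.Set.ofList omitted_indices)) PySem.Dict.empty
            (PySem.List.sorted ((PySem.Dict.ofList mapping).keys.filter (fun k => decide (0 ≤ k))) (fun x => x) false)).items
    set ks := PySem.List.sorted ((PySem.Dict.ofList mapping).keys.filter (fun k => decide (0 ≤ k))) (fun x => x) false with hksdef
    have hc0 : pvC (PySem.Set.ofList omitted_indices) 0 = 0 := by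
      unfold pvC
      have h : (fun o : Int => decide (0 ≤ o ∧ o < 0)) = fun _ => false := by
        funext o
        simp
      rw [h]
      simp
    by_cases hm1 : 0 ≤ m + 1
    · have hloop := pvLoop_eq (PySem.Dict.ofList mapping) omitted_indices
        (PySem.Set.ofList omitted_indices) ks
        (PySem.Set.nodup_ofList _) (fun x => PySem.Set.mem_ofList _ _) hksdef hkeysnd
        ((m + 1).toNat) 0 PySem.Dict.empty le_rfl
      have hn : (0 : Int) + (((m + 1).toNat : Nat) : Int) = m + 1 := by
        rw [Int.toNat_of_nonneg hm1]
        ring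
      rw [hn, hc0, sub_zero] at hloop
      have hfull : ks.filter (fun k => decide (0 ≤ k ∧ k < m + 1)) = ks := by
        rw [List.filter_eq_self]
        intro k hk
        rw [hksdef, PySem.List.mem_sorted, List.mem_filter] at hk
        have hkm := hmax k hk.1
        simp only [decide_eq_true_iff] at hk ⊢
        exact ⟨hk.2, by omega⟩
      rw [hfull] at hloop
      rw [hloop]
    · have hr : PySem.List.pyRange 0 (m + 1) 1 = [] := PySem.List.pyRange_one_eq_nil (by omega)
      rw [hr]
      have hks0 : ks = [] := by
        cases hkse : ks with
        | nil => rfl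
        | cons k t =>
          exfalso
          have hkmem : k ∈ ks := by
            rw [hkse]
            exact List.mem_cons_self
          rw [hksdef, PySem.List.mem_sorted, List.mem_filter] at hkmem
          have hkm := hmax k hkmem.1
          simp only [decide_eq_true_iff] at hkmem
          omega
      rw [hks0]
      rfl
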